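-- pv_equiv track=rewrite | github.com/zmojtaba/crawl_from_namasha | namasha_api/fastapi/lib/python3.9/site-packages/parser_libraries/functions.py | get_dec
-- ===== SOURCE A (Python) =====
-- def get_dec(num, base):
--     res = 0
--     power = 0
--     while num > 0:
--         res += (num % 10)*(base**power)
--         power += 1
--         num //= 10
--     return res
-- ===== SOURCE B (Python) =====
-- def get_dec(num, base):
--     if num <= 0:
--         return 0
--     res = 0
--     for c in str(num):
--         res = res * base + int(c)
--     return res
-- ===== Notes on version B (the rewrite author's own statement) =====
-- stated objective: idiomatic
-- what changed: Replaces A's least-significant-first loop of num%10 times base**power with Horner's rule over the decimal string str(num), most-significant digit first, so no power is ever computed.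
import Mathlib
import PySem

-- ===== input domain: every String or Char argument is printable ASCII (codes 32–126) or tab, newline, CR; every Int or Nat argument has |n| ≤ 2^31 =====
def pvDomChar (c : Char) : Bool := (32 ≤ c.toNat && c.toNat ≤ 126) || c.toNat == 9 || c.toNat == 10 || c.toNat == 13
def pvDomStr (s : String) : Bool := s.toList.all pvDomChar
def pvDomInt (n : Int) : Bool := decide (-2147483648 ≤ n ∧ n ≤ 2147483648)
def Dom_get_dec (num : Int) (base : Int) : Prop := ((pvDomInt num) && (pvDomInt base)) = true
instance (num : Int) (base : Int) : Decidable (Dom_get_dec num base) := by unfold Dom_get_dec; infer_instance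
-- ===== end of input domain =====

-- B reads the decimal digits most-significant-first from str(num) with Horner's rule
-- instead of A's least-significant-first loop of num%10 times base**power (idiomatic; no powers).

-- ===== PORT A =====
-- the while loop of A, state (num, res, power); base**power with power ≥ 0 is base ^ power.toNat
def get_decLoop (num : Int) (res : Int) (power : Int) (base : Int) : Int :=
  if h : 0 < num then
    get_decLoop (PySem.Int.floordiv num 10) (res + (PySem.Int.mod num 10) * base ^ power.toNat)
      (power + 1) base
  else res
termination_by num.toNat
decreasing_by
  rw [PySem.Int.floordiv_eq_ediv_of_pos (by omega : (0:Int) < 10)]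
  omega

def get_dec (num : Int) (base : Int) : Int := get_decLoop num 0 0 base

-- ===== PORT B =====
-- int(c) on a decimal digit character c (the only characters str(num), num > 0, contains)
-- is exactly c.toNat - 48: ported by hand, exact on that domain.
def get_dec_alt (num : Int) (base : Int) : Int :=
  if num ≤ 0 then 0
  else (PySem.Int.toChars num).foldl (fun r c => r * base + ((c.toNat : Int) - 48)) 0

-- ===== PRECONDITION & SPEC =====
def Spec_get_dec (num : Int) (base : Int) (out : Int) : Prop := out = get_dec_alt num base
instance (num : Int) (base : Int) (out : Int) : Decidable (Spec_get_dec num base out) := by unfold Spec_get_dec; infer_instance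

-- ===== CLAIM (what is proved, stated in full; the proofs are below) =====
def Claim_equal_get_dec : Prop := ∀ (num : Int) (base : Int), Dom_get_dec num base → Spec_get_dec num base (get_dec num base)

-- ===== LEMMAS AND PROOFS =====

-- the common mathematical value: gA base n = Σ decimal digit_i of n · base^i (LSB recursion)
def gA (base : Int) (n : Nat) : Int :=
  if _ : n = 0 then 0 else ((n % 10 : Nat) : Int) + base * gA base (n / 10)
termination_by n
decreasing_by omega

theorem gA_zero (base : Int) : gA base 0 = 0 := by rw [gA]; rfl

theorem gA_pos (base : Int) {n : Nat} (h : n ≠ 0) :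
    gA base n = ((n % 10 : Nat) : Int) + base * gA base (n / 10) := by
  rw [gA, dif_neg h]

-- myDigits n = the decimal digit characters of n, MSB first (one digit for n = 0)
def myDigits (n : Nat) : List Char :=
  if _ : n < 10 then [Nat.digitChar n] else myDigits (n / 10) ++ [Nat.digitChar (n % 10)]
termination_by n
decreasing_by omega

theorem myDigits_small {n : Nat} (h : n < 10) : myDigits n = [Nat.digitChar n] := by
  rw [myDigits, dif_pos h]

theorem myDigits_big {n : Nat} (h : 10 ≤ n) :
    myDigits n = myDigits (n / 10) ++ [Nat.digitChar (n % 10)] := by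
  rw [myDigits, dif_neg (by omega)]

theorem toDigitsCore_eq_myDigits : ∀ (f n : Nat) (l : List Char), n ≤ f →
    Nat.toDigitsCore 10 (f + 1) n l = myDigits n ++ l := by
  intro f
  induction f with
  | zero =>
    intro n l hn
    interval_cases n
    simp [Nat.toDigitsCore, myDigits_small]
  | succ f ih =>
    intro n l hn
    rw [Nat.toDigitsCore]
    by_cases h0 : n / 10 = 0
    · rw [if_pos h0, myDigits_small (by omega), Nat.mod_eq_of_lt (by omega)]
      simp
    · rw [if_neg h0]
      have hlt : n / 10 < n := Nat.div_lt_self (by omega) (by omega)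
      have h1 : n / 10 ≤ f := by omega
      rw [ih (n / 10) _ h1, myDigits_big (show 10 ≤ n by omega)]
      simp
  
theorem toDigits_eq_myDigits (n : Nat) : Nat.toDigits 10 n = myDigits n := by
  rw [Nat.toDigits]
  simpa using toDigitsCore_eq_myDigits n n [] le_rfl

theorem digitChar_val : ∀ d : Nat, d < 10 → ((Nat.digitChar d).toNat : Int) - 48 = (d : Int) := by
  decide

theorem foldl_myDigits (base : Int) : ∀ (n : Nat) (r : Int),
    (myDigits n).foldl (fun r c => r * base + ((c.toNat : Int) - 48)) r
      = r * base ^ (myDigits n).length + gA base n := by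
  intro n
  induction n using Nat.strong_induction_on with
  | _ n ih =>
    intro r
    by_cases h : n < 10
    · rw [myDigits_small h]
      simp only [List.foldl_cons, List.foldl_nil, List.length_singleton, pow_one]
      rw [digitChar_val n h]
      by_cases h0 : n = 0
      · subst h0; rw [gA_zero]; simp
      · rw [gA_pos base h0, Nat.div_eq_of_lt h, gA_zero, Nat.mod_eq_of_lt h]
        ring
    · have h10 : 10 ≤ n := by omega
      rw [myDigits_big h10, List.foldl_append,
        ih (n / 10) (Nat.div_lt_self (by omega) (by omega)) r]
      simp only [List.foldl_cons, List.foldl_nil, List.length_append, List.length_singleton]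
      rw [digitChar_val (n % 10) (Nat.mod_lt _ (by omega)), gA_pos base (show n ≠ 0 by omega)]
      ring

theorem loop_eq_gA (base : Int) : ∀ (n : Nat) (res : Int) (power : Nat),
    get_decLoop (n : Int) res (power : Int) base = res + base ^ power * gA base n := by
  intro n
  induction n using Nat.strong_induction_on with
  | _ n ih =>
    intro res power
    by_cases h0 : n = 0
    · subst h0
      rw [get_decLoop, dif_neg (by omega), gA_zero]
      ring
    · rw [get_decLoop, dif_pos (by exact_mod_cast Nat.pos_of_ne_zero h0)]
      have hf : PySem.Int.floordiv (n : Int) 10 = ((n / 10 : Nat) : Int) := by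
        exact_mod_cast PySem.Int.floordiv_natCast n 10
      have hm : PySem.Int.mod (n : Int) 10 = ((n % 10 : Nat) : Int) := by
        exact_mod_cast PySem.Int.mod_natCast n 10
      have hcast : ((power : Int) + 1) = ((power + 1 : Nat) : Int) := by push_cast; ring
      rw [hf, hm, hcast, Int.toNat_natCast,
        ih (n / 10) (Nat.div_lt_self (Nat.pos_of_ne_zero h0) (by omega)) _ (power + 1),
        gA_pos base h0]
      ring

theorem get_dec_eq (num base : Int) : get_dec num base = get_dec_alt num base := by
  by_cases h : num ≤ 0
  · rw [get_dec, get_decLoop, dif_neg (by omega), get_dec_alt, if_pos h]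
  · obtain ⟨m, hm⟩ : ∃ m : Nat, num = (m : Int) := ⟨num.toNat, by omega⟩
    subst hm
    rw [get_dec, get_dec_alt, if_neg h]
    rw [PySem.Int.toChars, if_neg (by omega), Int.toNat_natCast,
      toDigits_eq_myDigits, foldl_myDigits base m 0]
    have : get_decLoop (m : Int) 0 ((0 : Nat) : Int) base = 0 + base ^ (0 : Nat) * gA base m :=
      loop_eq_gA base m 0 0
    simp only [Nat.cast_zero, pow_zero] at this
    rw [this]
    ring

-- ===== VERDICT (by name: the statement is the Claim_ definition above) =====
theorem get_dec_spec : Claim_equal_get_dec := by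
  intro num base _
  unfold Spec_get_dec
  exact get_dec_eq num base
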